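-- pv_equiv track=rewrite | github.com/LOFIBOY217/wildfire-refactored | scripts/check_s2s_ecmwf_availability.py | summarize_gaps
-- ===== SOURCE A (Python) =====
-- from typing import Dict, List, Tuple
--
-- def summarize_gaps(sorted_dates: List[str], results: Dict[str, bool]) -> List[Tuple[str, str]]:
--     """Return unavailable contiguous date ranges in YYYY-MM-DD strings."""
--     gaps = []
--     gap_start = None
--     prev_d = None
--     for d in sorted_dates:
--         if not results[d]:
--             if gap_start is None:
--                 gap_start = d
--         else:
--             if gap_start is not None and prev_d is not None:
--                 gaps.append((gap_start, prev_d))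
--                 gap_start = None
--         prev_d = d
--     if gap_start is not None:
--         gaps.append((gap_start, sorted_dates[-1]))
--     return gaps
-- ===== SOURCE B (Python) =====
-- from typing import Dict, List, Tuple
--
-- def summarize_gaps(sorted_dates: List[str], results: Dict[str, bool]) -> List[Tuple[str, str]]:
--     """Return unavailable contiguous date ranges in YYYY-MM-DD strings."""
--     gaps = []
--     i = 0
--     n = len(sorted_dates)
--     while i < n:
--         avail = results[sorted_dates[i]]
--         j = i + 1
--         while j < n and results[sorted_dates[j]] == avail:
--             j += 1
--         if not avail:
--             gaps.append((sorted_dates[i], sorted_dates[j - 1]))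
--         i = j
--     return gaps
-- ===== Notes on version B (the rewrite author's own statement) =====
-- stated objective: alternative
-- what changed: Replaces A's gap_start/prev_d state machine (with a separate end-of-list fixup using sorted_dates[-1]) by a run-grouping scan: advance over each maximal run of equal availability and emit (run start, run end) for unavailable runs.
import Mathlib
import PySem

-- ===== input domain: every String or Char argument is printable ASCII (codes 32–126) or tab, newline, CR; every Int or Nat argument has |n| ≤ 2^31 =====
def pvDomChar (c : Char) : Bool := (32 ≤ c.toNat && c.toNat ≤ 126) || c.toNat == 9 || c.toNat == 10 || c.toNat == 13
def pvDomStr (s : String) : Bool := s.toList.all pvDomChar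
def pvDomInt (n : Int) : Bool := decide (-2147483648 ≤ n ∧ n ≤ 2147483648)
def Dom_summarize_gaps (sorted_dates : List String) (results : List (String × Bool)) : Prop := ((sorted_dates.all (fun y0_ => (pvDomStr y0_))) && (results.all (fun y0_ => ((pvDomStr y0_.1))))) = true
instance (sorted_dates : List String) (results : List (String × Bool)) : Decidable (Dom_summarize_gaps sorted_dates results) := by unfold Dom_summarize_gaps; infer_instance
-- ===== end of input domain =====

-- B replaces A's gap_start/prev_d state machine by a scan over maximal runs of equal
-- availability, emitting (first, last) of each unavailable run (objective: alternative).

-- ===== PORT A =====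
-- loop body of A: state = (gaps, gap_start, prev_d); results[d] = first-match lookup
def pvStepA (results : List (String × Bool)) (st : List (String × String) × Option String × Option String) (d : String) : List (String × String) × Option String × Option String :=
  if ((List.lookup d results).getD false) = false then
    (st.1, (match st.2.1 with | none => some d | some gs => some gs), some d)
  else
    match st.2.1, st.2.2 with
    | some gs, some p => (st.1 ++ [(gs, p)], (none : Option String), some d)
    | _, _ => (st.1, st.2.1, some d)

def summarize_gaps (sorted_dates : List String) (results : List (String × Bool)) : List (String × String) :=
  let st := sorted_dates.foldl (pvStepA results) ([], none, none)
  match st.2.1 with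
  -- sorted_dates[-1]; this branch is only reached when sorted_dates ≠ [], where pyGetD is exact
  | some gs => st.1 ++ [(gs, PySem.List.pyGetD sorted_dates (-1) "")]
  | none => st.1

-- ===== PORT B =====
-- outer while-loop of B: take the maximal run of availability equal to the head's,
-- emit it if unavailable, continue after the run
def pvRunsGo (f : String → Bool) : List String → List (String × String)
  | [] => []
  | d :: ds =>
      (if f d then [] else [(d, (d :: ds.takeWhile (fun x => f x == f d)).getLastD "")])
      ++ pvRunsGo f (ds.dropWhile (fun x => f x == f d))
termination_by l => l.length
decreasing_by
  simp only [List.length_cons]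
  exact Nat.lt_succ_of_le (List.length_dropWhile_le _ _)

def summarize_gaps_alt (sorted_dates : List String) (results : List (String × Bool)) : List (String × String) :=
  pvRunsGo (fun d => (List.lookup d results).getD false) sorted_dates

-- ===== PRECONDITION & SPEC =====
-- Pre_ excludes exactly the inputs where some date is not a key of results: there Python A
-- (and Python B) raise KeyError.
def Pre_summarize_gaps (sorted_dates : List String) (results : List (String × Bool)) : Prop :=
  ∀ d ∈ sorted_dates, d ∈ results.map Prod.fst
instance (sorted_dates : List String) (results : List (String × Bool)) : Decidable (Pre_summarize_gaps sorted_dates results) := by unfold Pre_summarize_gaps; infer_instance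

def pvWitness_summarize_gaps : List String × (List (String × Bool)) :=
  (["2020-01-01", "2020-01-02", "2020-01-03"],
   [("2020-01-01", true), ("2020-01-02", false), ("2020-01-03", false)])

def Spec_summarize_gaps (sorted_dates : List String) (results : List (String × Bool)) (out : List (String × String)) : Prop := out = summarize_gaps_alt sorted_dates results
instance (sorted_dates : List String) (results : List (String × Bool)) (out : List (String × String)) : Decidable (Spec_summarize_gaps sorted_dates results out) := by unfold Spec_summarize_gaps; infer_instance

-- ===== CLAIM (what is proved, stated in full; the proofs are below) =====
def Claim_equal_summarize_gaps : Prop := ∀ (sorted_dates : List String) (results : List (String × Bool)), Dom_summarize_gaps sorted_dates results → Pre_summarize_gaps sorted_dates results → Spec_summarize_gaps sorted_dates results (summarize_gaps sorted_dates results)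

-- ===== LEMMAS AND PROOFS =====

-- A's result read off a final loop state (valid because, whenever gap_start is set at the
-- end, prev_d holds the last element of the list = sorted_dates[-1]; proved in pvWrap below)
def pvOut (st : List (String × String) × Option String × Option String) : List (String × String) :=
  match st with
  | (gaps, some gs, some pv) => gaps ++ [(gs, pv)]
  | (gaps, _, _) => gaps

-- B's scan when a gap starting at gs is open and pv was the last date seen
def pvOpen (f : String → Bool) (gs pv : String) : List String → List (String × String)
  | [] => [(gs, pv)]
  | d :: ds =>
      if f d then (gs, pv) :: pvRunsGo f (d :: ds)
      else (gs, (d :: ds.takeWhile (fun x => f x == f d)).getLastD "") :: pvRunsGo f (ds.dropWhile (fun x => f x == f d))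

theorem pvStepA_prev (results : List (String × Bool)) (st : List (String × String) × Option String × Option String) (d : String) :
    (pvStepA results st d).2.2 = some d := by
  unfold pvStepA
  split
  · rfl
  · split <;> rfl

theorem pvFoldl_prev (results : List (String × Bool)) (sd : List String) (st : List (String × String) × Option String × Option String) :
    (sd.foldl (pvStepA results) st).2.2 = sd.getLast?.or st.2.2 := by
  induction sd generalizing st with
  | nil => rfl
  | cons d ds ih =>
    rw [List.foldl_cons, ih, pvStepA_prev]
    rw [List.getLast?_cons]
    cases h : ds.getLast? with
    | none =>
      simp [List.getLastD_eq_getLast?]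
    | some x =>
      simp [List.getLastD_eq_getLast?]

theorem pvRunsGo_dropTrue (f : String → Bool) (ds : List String) :
    pvRunsGo f (ds.dropWhile (fun x => f x == true)) = pvRunsGo f ds := by
  cases ds with
  | nil => rfl
  | cons e ds' =>
    by_cases h : f e = true
    · rw [List.dropWhile_cons]
      simp only [h]
      conv_rhs => rw [pvRunsGo]
      simp [h]
    · rw [List.dropWhile_cons]
      simp [h]

theorem pvMain (results : List (String × Bool)) (sd : List String) :
    (∀ gaps po, pvOut (sd.foldl (pvStepA results) (gaps, none, po)) = gaps ++ pvRunsGo (fun d => (List.lookup d results).getD false) sd)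
    ∧ (∀ gaps gs pv, pvOut (sd.foldl (pvStepA results) (gaps, some gs, some pv)) = gaps ++ pvOpen (fun d => (List.lookup d results).getD false) gs pv sd) := by
  set f : String → Bool := fun d => (List.lookup d results).getD false with hf
  induction sd with
  | nil =>
    constructor
    · intro gaps po; simp [pvOut, pvRunsGo]
    · intro gaps gs pv; simp [pvOut, pvOpen]
  | cons d ds ih =>
    obtain ⟨iha, ihb⟩ := ih
    constructor
    · intro gaps po
      rw [List.foldl_cons]
      by_cases hd : f d = true
      · have : pvStepA results (gaps, none, po) d = (gaps, none, some d) := by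
          unfold pvStepA; simp [hf] at hd; simp [hd]
        rw [this, iha]
        congr 1
        conv_rhs => rw [pvRunsGo]
        simp only [hd, if_pos, List.nil_append]
        rw [pvRunsGo_dropTrue]
      · have hd' : f d = false := by simpa using hd
        have : pvStepA results (gaps, none, po) d = (gaps, some d, some d) := by
          unfold pvStepA; simp [hf] at hd'; simp [hd']
        rw [this, ihb gaps d d]
        congr 1
        conv_rhs => rw [pvRunsGo]
        simp only [hd', ite_false, Bool.false_eq_true]
        cases ds with
        | nil => simp [pvOpen, pvRunsGo]
        | cons e ds' =>
          by_cases he : f e = true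
          · rw [pvOpen]
            simp [he]
          · have he' : f e = false := by simpa using he
            rw [pvOpen]
            simp only [he', Bool.false_eq_true, ite_false, List.takeWhile_cons, List.dropWhile_cons, beq_self_eq_true, ite_true]
            simp
    · intro gaps gs pv
      rw [List.foldl_cons]
      by_cases hd : f d = true
      · have : pvStepA results (gaps, some gs, some pv) d = (gaps ++ [(gs, pv)], none, some d) := by
          unfold pvStepA; simp [hf] at hd; simp [hd]
        rw [this, iha]
        rw [pvOpen]
        simp only [hd, ite_true]
        conv_rhs => rw [pvRunsGo]
        simp only [hd, ite_true, List.nil_append]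
        rw [pvRunsGo_dropTrue]
        simp
      · have hd' : f d = false := by simpa using hd
        have : pvStepA results (gaps, some gs, some pv) d = (gaps, some gs, some d) := by
          unfold pvStepA; simp [hf] at hd'; simp [hd']
        rw [this, ihb gaps gs d]
        congr 1
        rw [pvOpen]
        simp only [hd', Bool.false_eq_true, ite_false]
        cases ds with
        | nil => simp [pvOpen, pvRunsGo]
        | cons e ds' =>
          by_cases he : f e = true
          · rw [pvOpen]
            simp [he]
          · have he' : f e = false := by simpa using he
            rw [pvOpen]
            simp only [he', Bool.false_eq_true, ite_false, List.takeWhile_cons, List.dropWhile_cons, beq_self_eq_true, ite_true]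
            simp

theorem pvWrap (sorted_dates : List String) (results : List (String × Bool)) :
    summarize_gaps sorted_dates results = pvOut (sorted_dates.foldl (pvStepA results) ([], none, none)) := by
  unfold summarize_gaps
  cases hg : (sorted_dates.foldl (pvStepA results) ([], none, none)).2.1 with
  | none =>
    simp only [hg]
    rcases hst : sorted_dates.foldl (pvStepA results) ([], none, none) with ⟨g, gso, po⟩
    rw [hst] at hg; simp at hg; subst hg
    cases po <;> simp [pvOut]
  | some gs =>
    have hne : sorted_dates ≠ [] := by
      intro h; subst h; simp at hg
    have hprev := pvFoldl_prev results sorted_dates ([], none, none)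
    rw [List.getLast?_eq_some_getLast hne] at hprev
    simp only [hg]
    rcases hst : sorted_dates.foldl (pvStepA results) ([], none, none) with ⟨g, gso, po⟩
    rw [hst] at hg hprev; simp at hg hprev; subst hg; subst hprev
    simp [pvOut, PySem.List.pyGetD_neg_one _ _ hne]

-- ===== VERDICT (by name: the statement is the Claim_ definition above) =====
theorem summarize_gaps_spec : Claim_equal_summarize_gaps := by
  intro sorted_dates results _ _
  unfold Spec_summarize_gaps summarize_gaps_alt
  rw [pvWrap]
  simpa using (pvMain results sorted_dates).1 [] none
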